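-- pv_equiv track=rewrite | github.com/jchcdwgithub/AOS6-CLI-Parser | aos6parser.py | build_attributes_arrays
-- ===== SOURCE A (Python) =====
-- def build_attributes_arrays(objects_attributes):
--
--     attributes_arrays = []
--     for objects in objects_attributes:
--         attributes_object = add_keys_to_attributes_object(objects_attributes[objects])
--         for object_attributes in objects_attributes[objects]:
--             for attribute in object_attributes:
--                 processed_attribute_list = process_attribute_list(object_attributes[attribute])
--                 attributes_object[attribute].append(processed_attribute_list)
--             for attribute in attributes_object:
--                 if not attribute in object_attributes:
--                     attributes_object[attribute].append('')
--         attributes_arrays.append(attributes_object)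
--     return attributes_arrays
--
-- def add_keys_to_attributes_object(objects):
--     attributes_object = {}
--     for object in objects:
--         for key in object:
--             if not key in attributes_object:
--                 attributes_object[key] = []
--     return attributes_object
--
-- def process_attribute_list(list):
--
--     if len(list) == 0:
--         return ''
--     processed_list = list[0]
--     for word in list[1:]:
--         processed_list += f' ,{word}'
--     return processed_list
-- ===== SOURCE B (Python) =====
-- def process_attribute_list(list):
--
--     if len(list) == 0:
--         return ''
--     processed_list = list[0]
--     for word in list[1:]:
--         processed_list += f' ,{word}'
--     return processed_list
--
-- def build_group(group):
--     # Recursive back-to-front merge: the table for obj::rest is the one-row table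
--     # for obj merged onto the table for rest, padding absent keys with ''.
--     if not group:
--         return {}
--     first, rest = group[0], group[1:]
--     tail = build_group(rest)
--     pad = [''] * len(rest)
--     merged = {key: [process_attribute_list(value)] + tail.get(key, pad)
--               for key, value in first.items()}
--     for key, column in tail.items():
--         if key not in merged:
--             merged[key] = [''] + column
--     return merged
--
-- def build_attributes_arrays(objects_attributes):
--     return [build_group(group) for group in objects_attributes.values()]
-- ===== Notes on version B (the rewrite author's own statement) =====
-- stated objective: alternative
-- what changed: B replaces A's iterative two-pass build (pre-seed empty columns, append present values, then pad missing keys in a second per-object pass) with a recursive divide: the table for obj::rest is the one-row table for obj merged onto the recursively built table for rest, padding absent keys with computed-length '' runs.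
import Mathlib
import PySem

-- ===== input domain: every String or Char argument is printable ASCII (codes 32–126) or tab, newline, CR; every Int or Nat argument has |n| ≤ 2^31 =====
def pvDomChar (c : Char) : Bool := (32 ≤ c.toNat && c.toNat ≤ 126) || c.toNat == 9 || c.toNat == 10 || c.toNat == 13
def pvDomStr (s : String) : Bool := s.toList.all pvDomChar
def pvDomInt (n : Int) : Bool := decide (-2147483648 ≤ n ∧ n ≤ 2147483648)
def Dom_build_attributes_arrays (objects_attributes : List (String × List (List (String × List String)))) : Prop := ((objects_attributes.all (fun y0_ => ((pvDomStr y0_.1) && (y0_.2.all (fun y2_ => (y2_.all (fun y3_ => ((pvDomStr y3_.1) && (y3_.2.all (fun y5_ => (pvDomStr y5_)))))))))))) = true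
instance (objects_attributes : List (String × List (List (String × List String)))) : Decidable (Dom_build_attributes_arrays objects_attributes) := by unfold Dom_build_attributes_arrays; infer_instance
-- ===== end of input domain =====

-- B builds each group's table by recursive back-to-front merge (one-row table merged onto the
-- tail's table with computed ''-padding) instead of A's iterative append-then-pad two-pass build.


-- ===== PORT A =====
-- helper shared verbatim by A and B (Source B reuses process_attribute_list unchanged)
def process_attribute_list (l : List String) : String :=
  match l with
  | [] => ""
  | x :: rest => rest.foldl (fun acc w => acc ++ " ," ++ w) x

def add_keys_to_attributes_object (objects : List (List (String × List String))) :
    PySem.Dict String (List String) :=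
  objects.foldl
    (fun d obj => (obj.map (·.1)).foldl
      (fun d key => if d.contains key then d else d.insert key ([] : List String)) d)
    (PySem.Dict.mk [])

-- 'for x in dict' iterates keys; 'dict[x]' is first-match lookup (never missing for a real dict,
-- so getD's default is unreachable); 'd[k].append(v)' is Dict.modify (the key is always present).
def build_attributes_arrays (objects_attributes : List (String × List (List (String × List String)))) : List (List (String × List String)) :=
  (objects_attributes.map (·.1)).foldl
    (fun attributes_arrays objects =>
      let group := (PySem.Dict.mk objects_attributes).getD objects []
      let ao0 := add_keys_to_attributes_object group
      let ao :=
        group.foldl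
          (fun ao object_attributes =>
            let ao1 :=
              (object_attributes.map (·.1)).foldl
                (fun ao attr =>
                  ao.modify attr []
                    (fun col => col ++ [process_attribute_list
                        ((PySem.Dict.mk object_attributes).getD attr [])]))
                ao
            ao1.keys.foldl
              (fun ao2 attr =>
                if (PySem.Dict.mk object_attributes).contains attr then ao2
                else ao2.modify attr [] (fun col => col ++ [""]))
              ao1)
          ao0
      attributes_arrays ++ [ao.items])
    []

-- ===== PORT B =====
-- B recursively merges the head object's one-row table onto the tail's table; absent keys are
-- padded with '' runs whose length is the number of objects already covered.
def build_group (group : List (List (String × List String))) : PySem.Dict String (List String) :=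
  match group with
  | [] => PySem.Dict.mk []
  | first :: rest =>
    let tail := build_group rest
    let pad := List.replicate rest.length ""
    let merged := PySem.Dict.mk (first.map (fun p =>
      (p.1, [process_attribute_list p.2] ++ tail.getD p.1 pad)))
    tail.items.foldl
      (fun m p => if m.contains p.1 then m else m.insert p.1 ([""] ++ p.2)) merged

def build_attributes_arrays_alt (objects_attributes : List (String × List (List (String × List String)))) : List (List (String × List String)) :=
  objects_attributes.map (fun pr => (build_group pr.2).items)

-- ===== PRECONDITION & SPEC =====
-- Pre_ requires distinct keys inside each association list (outer and inner): they model Python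
-- dicts, which cannot hold duplicate keys, so no Python input is excluded.
def Pre_build_attributes_arrays (objects_attributes : List (String × List (List (String × List String)))) : Prop :=
  (objects_attributes.map (·.1)).Nodup ∧
  ∀ pr ∈ objects_attributes, ∀ obj ∈ pr.2, (obj.map (·.1)).Nodup
instance (objects_attributes : List (String × List (List (String × List String)))) : Decidable (Pre_build_attributes_arrays objects_attributes) := by unfold Pre_build_attributes_arrays; infer_instance

def pvWitness_build_attributes_arrays : (List (String × List (List (String × List String)))) :=
  [("ap", [[("name", ["ap1"]), ("group", ["g1", "g2"])], [("name", ["ap2"])]])]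

def Spec_build_attributes_arrays (objects_attributes : List (String × List (List (String × List String)))) (out : List (List (String × List String))) : Prop := out = build_attributes_arrays_alt objects_attributes
instance (objects_attributes : List (String × List (List (String × List String)))) (out : List (List (String × List String))) : Decidable (Spec_build_attributes_arrays objects_attributes out) := by unfold Spec_build_attributes_arrays; infer_instance

-- ===== CLAIM (what is proved, stated in full; the proofs are below) =====
def Claim_equal_build_attributes_arrays : Prop := ∀ (objects_attributes : List (String × List (List (String × List String)))), Dom_build_attributes_arrays objects_attributes → Pre_build_attributes_arrays objects_attributes → Spec_build_attributes_arrays objects_attributes (build_attributes_arrays objects_attributes)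

-- ===== LEMMAS AND PROOFS =====
lemma contains_mk_iff (l : List (String × List String)) (k : String) :
    (PySem.Dict.mk l).contains k = true ↔ k ∈ l.map (·.1) := by
  rw [PySem.Dict.contains_iff_mem_keys]; rfl

lemma get?_mk_map (keys : List String) (c : String → List String) (k : String) (hk : k ∈ keys) :
    (PySem.Dict.mk (keys.map (fun k' => (k', c k')))).get? k = some (c k) := by
  induction keys with
  | nil => cases hk
  | cons a t ih =>
      simp only [List.map_cons, PySem.Dict.get?_mk_cons]
      by_cases h : a = k
      · subst h; simp
      · simp only [beq_iff_eq, h, if_false]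
        exact ih (by cases hk with | head => exact absurd rfl h | tail _ h2 => exact h2)

lemma modify_mk_map (keys : List String) (c : String → List String) (k : String) (hk : k ∈ keys)
    (f : List String → List String) :
    (PySem.Dict.mk (keys.map (fun k' => (k', c k')))).modify k [] f
    = PySem.Dict.mk (keys.map (fun k' => (k', if k' = k then f (c k') else c k'))) := by
  have hc : (PySem.Dict.mk (keys.map (fun k' => (k', c k')))).contains k = true := by
    rw [contains_mk_iff]; simpa using hk
  have hg := get?_mk_map keys c k hk
  simp only [PySem.Dict.modify, PySem.Dict.getD, hg, Option.getD_some, PySem.Dict.insert, hc,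
    if_true]
  congr 1
  simp only [List.map_map]
  refine List.map_congr_left (fun x hx => ?_)
  by_cases h : x = k
  · subst h; simp
  · simp [h]

-- pass 1: modify-append per present key (ks the object's distinct keys)
lemma pass1_eq (ks keys : List String) (v : String → String) (c : String → List String)
    (hsub : ∀ k ∈ ks, k ∈ keys) (hnd : ks.Nodup) :
    ks.foldl (fun d k => d.modify k [] (fun col => col ++ [v k]))
      (PySem.Dict.mk (keys.map (fun k' => (k', c k'))))
    = PySem.Dict.mk (keys.map (fun k' => (k', if k' ∈ ks then c k' ++ [v k'] else c k'))) := by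
  induction ks generalizing c with
  | nil => simp
  | cons a t ih =>
      have ha : a ∈ keys := hsub a (by simp)
      simp only [List.foldl_cons, modify_mk_map keys c a ha]
      rw [ih _ (fun k hk => hsub k (List.mem_cons_of_mem _ hk)) hnd.of_cons]
      congr 1
      refine List.map_congr_left (fun x hx => ?_)
      by_cases h1 : x ∈ t
      · have hne : x ≠ a := fun he => ( (List.nodup_cons.mp hnd).1 (he ▸ h1)).elim
        simp [h1, hne]
      · by_cases h2 : x = a
        · subst h2; simp [h1]
        · simp [h1, h2]

-- pass 2: pad '' for keys not in the object
lemma pass2_eq (js keys : List String) (p : String → Bool) (c : String → List String)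
    (hsub : ∀ k ∈ js, k ∈ keys) (hnd : js.Nodup) :
    js.foldl (fun d k => if p k then d else d.modify k [] (fun col => col ++ [""]))
      (PySem.Dict.mk (keys.map (fun k' => (k', c k'))))
    = PySem.Dict.mk (keys.map (fun k' => (k', if k' ∈ js ∧ p k' = false then c k' ++ [""] else c k'))) := by
  induction js generalizing c with
  | nil => simp
  | cons a t ih =>
      have ha : a ∈ keys := hsub a (by simp)
      by_cases hp : p a
      · simp only [List.foldl_cons, hp, if_true]
        rw [ih _ (fun k hk => hsub k (List.mem_cons_of_mem _ hk)) hnd.of_cons]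
        congr 1
        refine List.map_congr_left (fun x hx => ?_)
        by_cases h1 : x ∈ t
        · simp [h1]
        · by_cases h2 : x = a
          · subst h2; simp [h1, hp]
          · simp [h1, h2]
      · simp only [List.foldl_cons, hp, if_false, Bool.false_eq_true,
          modify_mk_map keys c a ha]
        rw [ih _ (fun k hk => hsub k (List.mem_cons_of_mem _ hk)) hnd.of_cons]
        congr 1
        refine List.map_congr_left (fun x hx => ?_)
        by_cases h1 : x ∈ t
        · have hne : x ≠ a := fun he => ( (List.nodup_cons.mp hnd).1 (he ▸ h1)).elim
          by_cases h3 : p x <;> simp [h1, hne, h3]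
        · by_cases h2 : x = a
          · subst h2; simp [h1, hp]
          · simp [h1, h2]

def rowVal (obj : List (String × List String)) (k : String) : String :=
  match (PySem.Dict.mk obj).get? k with
  | some v => process_attribute_list v
  | none => ""

-- one object of A's group loop: append a value to every present key's column, '' to the rest
lemma obj_step (obj : List (String × List String)) (keys : List String) (c : String → List String)
    (hndk : keys.Nodup) (hsub : ∀ k ∈ obj.map (·.1), k ∈ keys) (hobj : (obj.map (·.1)).Nodup) :
    ((obj.map (·.1)).foldl
        (fun ao attr =>
          ao.modify attr []
            (fun col => col ++ [process_attribute_list ((PySem.Dict.mk obj).getD attr [])]))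
        (PySem.Dict.mk (keys.map (fun k' => (k', c k'))))).keys.foldl
      (fun ao2 attr =>
        if (PySem.Dict.mk obj).contains attr then ao2
        else ao2.modify attr [] (fun col => col ++ [""]))
      ((obj.map (·.1)).foldl
        (fun ao attr =>
          ao.modify attr []
            (fun col => col ++ [process_attribute_list ((PySem.Dict.mk obj).getD attr [])]))
        (PySem.Dict.mk (keys.map (fun k' => (k', c k')))))
    = PySem.Dict.mk (keys.map (fun k' => (k', c k' ++ [rowVal obj k']))) := by
  rw [pass1_eq (obj.map (·.1)) keys _ c hsub hobj]
  have hkeys : (PySem.Dict.mk (keys.map (fun k' =>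
      (k', if k' ∈ obj.map (·.1) then c k' ++ [process_attribute_list ((PySem.Dict.mk obj).getD k' [])] else c k')))).keys = keys := by
    simp only [PySem.Dict.keys, List.map_map]
    exact List.map_id keys
  rw [hkeys, pass2_eq keys keys _ _ (fun k hk => hk) hndk]
  congr 1
  refine List.map_congr_left (fun x hx => ?_)
  by_cases h : (PySem.Dict.mk obj).contains x
  · have hmem : x ∈ obj.map (·.1) := (contains_mk_iff obj x).mp h
    have hsome : ((PySem.Dict.mk obj).get? x).isSome := by
      rw [← PySem.Dict.contains_eq_isSome_get?, h]
    obtain ⟨w, hw⟩ := Option.isSome_iff_exists.mp hsome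
    simp [h, hmem, hx, rowVal, hw, PySem.Dict.getD, Option.getD_some]
  · have hmem : x ∉ obj.map (·.1) := fun hm => h ((contains_mk_iff obj x).mpr hm)
    have hnone : (PySem.Dict.mk obj).get? x = none :=
      (PySem.Dict.get?_eq_none_iff_contains _ _).mpr (Bool.eq_false_iff.mpr h)
    simp [h, hmem, hx, rowVal, hnone]

-- A's whole group loop
lemma group_fold (objs : List (List (String × List String))) (keys : List String)
    (c : String → List String) (hndk : keys.Nodup)
    (hsub : ∀ obj ∈ objs, ∀ k ∈ obj.map (·.1), k ∈ keys)
    (hobj : ∀ obj ∈ objs, (obj.map (·.1)).Nodup) :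
    objs.foldl
      (fun ao object_attributes =>
        let ao1 :=
          (object_attributes.map (·.1)).foldl
            (fun ao attr =>
              ao.modify attr []
                (fun col => col ++ [process_attribute_list
                    ((PySem.Dict.mk object_attributes).getD attr [])]))
            ao
        ao1.keys.foldl
          (fun ao2 attr =>
            if (PySem.Dict.mk object_attributes).contains attr then ao2
            else ao2.modify attr [] (fun col => col ++ [""]))
          ao1)
      (PySem.Dict.mk (keys.map (fun k' => (k', c k'))))
    = PySem.Dict.mk (keys.map (fun k' => (k', c k' ++ objs.map (fun obj => rowVal obj k')))) := by
  induction objs generalizing c with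
  | nil => simp
  | cons o t ih =>
      simp only [List.foldl_cons]
      rw [obj_step o keys c hndk (hsub o (by simp)) (hobj o (by simp))]
      rw [ih _ (fun obj ho => hsub obj (by simp [ho])) (fun obj ho => hobj obj (by simp [ho]))]
      simp [List.append_assoc]

-- add_keys: inserting fresh keys with [] is ordered set-union of the key lists
lemma fresh_fold (L ks : List String) :
    L.foldl (fun d key => if d.contains key then d else d.insert key ([] : List String))
      (PySem.Dict.mk (ks.map (fun k => (k, ([] : List String)))))
    = PySem.Dict.mk ((L.foldl PySem.Set.add ks).map (fun k => (k, []))) := by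
  induction L generalizing ks with
  | nil => simp
  | cons a t ih =>
      simp only [List.foldl_cons]
      by_cases h : a ∈ ks
      · have hc : (PySem.Dict.mk (ks.map (fun k => (k, ([] : List String))))).contains a = true := by
          rw [contains_mk_iff]; simpa using h
        have hadd : PySem.Set.add ks a = ks := by
          simp [PySem.Set.add, PySem.Set.contains, h]
        simp only [hc, if_true, hadd]
        exact ih ks
      · have hc : (PySem.Dict.mk (ks.map (fun k => (k, ([] : List String))))).contains a = false := by
          rw [Bool.eq_false_iff]
          intro hcon
          exact h (by simpa using (contains_mk_iff _ a).mp hcon)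
        have hadd : PySem.Set.add ks a = ks ++ [a] := by
          simp [PySem.Set.add, PySem.Set.contains, h]
        simp only [hc, Bool.false_eq_true, if_false, hadd]
        have hins : (PySem.Dict.mk (ks.map (fun k => (k, ([] : List String))))).insert a []
            = PySem.Dict.mk ((ks ++ [a]).map (fun k => (k, ([] : List String)))) := by
          simp [PySem.Dict.insert, hc]
        rw [hins]
        exact ih (ks ++ [a])

lemma add_keys_gen (objs : List (List (String × List String))) (ks : List String) :
    objs.foldl
      (fun d obj => (obj.map (·.1)).foldl
        (fun d key => if d.contains key then d else d.insert key ([] : List String)) d)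
      (PySem.Dict.mk (ks.map (fun k => (k, []))))
    = PySem.Dict.mk
        ((objs.foldl (fun ks obj => (obj.map (·.1)).foldl PySem.Set.add ks) ks).map (fun k => (k, []))) := by
  induction objs generalizing ks with
  | nil => simp
  | cons o t ih =>
      simp only [List.foldl_cons]
      rw [fresh_fold (o.map (·.1)) ks]
      exact ih _

lemma add_keys_eq (objs : List (List (String × List String))) :
    add_keys_to_attributes_object objs
    = PySem.Dict.mk
        ((PySem.List.dedup (objs.flatMap (fun obj => obj.map (·.1)))).map (fun k => (k, []))) := by
  have h0 : (PySem.Dict.mk ([] : List (String × List String)))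
      = PySem.Dict.mk (([] : List String).map (fun k => (k, []))) := rfl
  have hflat : ∀ (objs : List (List (String × List String))) (init : List String),
      (objs.flatMap (fun obj => obj.map (·.1))).foldl PySem.Set.add init
      = objs.foldl (fun ks obj => (obj.map (·.1)).foldl PySem.Set.add ks) init := by
    intro objs
    induction objs with
    | nil => intro init; rfl
    | cons o t ih =>
        intro init
        simp only [List.flatMap_cons, List.foldl_append, List.foldl_cons]
        exact ih _
  rw [add_keys_to_attributes_object, h0, add_keys_gen,
    PySem.List.dedup_eq_ofList, PySem.Set.ofList_eq_foldl, hflat]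

-- first-match lookup of a key of a duplicate-free association list
lemma getD_mk_self (oa : List (String × List (List (String × List String))))
    (pr : String × List (List (String × List String))) (hpr : pr ∈ oa)
    (hnd : (oa.map (·.1)).Nodup) :
    (PySem.Dict.mk oa).getD pr.1 [] = pr.2 := by
  have := PySem.Dict.get?_of_mem_items (PySem.Dict.mk oa) (k := pr.1) (v := pr.2)
    (by simpa using hpr) (by simpa [PySem.Dict.keys] using hnd)
  simp [PySem.Dict.getD, this]

-- per-group equality: A's two-pass build equals the key-major columns
lemma group_eq (objs : List (List (String × List String)))
    (hobj : ∀ obj ∈ objs, (obj.map (·.1)).Nodup) :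
    (objs.foldl
      (fun ao object_attributes =>
        let ao1 :=
          (object_attributes.map (·.1)).foldl
            (fun ao attr =>
              ao.modify attr []
                (fun col => col ++ [process_attribute_list
                    ((PySem.Dict.mk object_attributes).getD attr [])]))
            ao
        ao1.keys.foldl
          (fun ao2 attr =>
            if (PySem.Dict.mk object_attributes).contains attr then ao2
            else ao2.modify attr [] (fun col => col ++ [""]))
          ao1)
      (add_keys_to_attributes_object objs)).items
    = (PySem.List.dedup (objs.flatMap (fun obj => obj.map (·.1)))).map
        (fun key => (key, objs.map (fun obj => rowVal obj key))) := by
  rw [add_keys_eq]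
  have hsub : ∀ obj ∈ objs, ∀ k ∈ obj.map (·.1),
      k ∈ PySem.List.dedup (objs.flatMap (fun obj => obj.map (·.1))) := by
    intro obj ho k hk
    rw [PySem.List.mem_dedup]
    exact List.mem_flatMap.mpr ⟨obj, ho, hk⟩
  have h := group_fold objs (PySem.List.dedup (objs.flatMap (fun obj => obj.map (·.1))))
    (fun _ => []) (PySem.List.nodup_dedup _) hsub hobj
  rw [h]
  simp

-- rowVal is '' on keys the object does not carry
lemma rowVal_of_not_mem (obj : List (String × List String)) (k : String)
    (h : k ∉ obj.map (·.1)) : rowVal obj k = "" := by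
  have hnone : (PySem.Dict.mk obj).get? k = none :=
    (PySem.Dict.get?_eq_none_iff_contains _ _).mpr
      (Bool.eq_false_iff.mpr (fun hc => h ((contains_mk_iff obj k).mp hc)))
  simp [rowVal, hnone]

-- B's second merge loop: skipped keys stay, fresh keys append (in order)
lemma skip_insert_fold (l : List (String × List String)) (m : PySem.Dict String (List String))
    (hl : (l.map (·.1)).Nodup) (hm : m.keys.Nodup) :
    (l.foldl (fun m p => if m.contains p.1 then m else m.insert p.1 ([""] ++ p.2)) m).items
    = m.items ++ (l.filter (fun p => !m.contains p.1)).map (fun p => (p.1, [""] ++ p.2)) := by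
  induction l generalizing m with
  | nil => simp
  | cons p t ih =>
      have hl' : p.1 ∉ t.map (·.1) ∧ (t.map (·.1)).Nodup := by simpa using hl
      have hpt : ∀ q ∈ t, q.1 ≠ p.1 := by
        intro q hq he
        have hmem : q.1 ∈ t.map (·.1) := List.mem_map_of_mem hq
        rw [he] at hmem
        exact hl'.1 hmem
      by_cases hc : m.contains p.1
      · simp only [List.foldl_cons, hc, if_true, List.filter_cons, Bool.not_true,
          Bool.false_eq_true, if_false]
        exact ih m (by simpa using hl'.2) hm
      · simp only [List.foldl_cons, hc, Bool.false_eq_true, if_false, List.filter_cons,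
          Bool.not_false, if_true]
        rw [ih (m.insert p.1 ([""] ++ p.2)) (by simpa using hl'.2)
          (PySem.Dict.nodup_keys_insert _ _ _ hm)]
        rw [PySem.Dict.items_insert_of_not_contains _ _ (Bool.eq_false_iff.mpr hc)]
        rw [List.filter_congr (l := t)
          (q := fun q => !m.contains q.1) (fun q hq => by
            rw [PySem.Dict.contains_insert]
            have : (q.1 == p.1) = false := beq_eq_false_iff_ne.mpr (hpt q hq)
            simp [this])]
        simp [List.append_assoc]

-- the keys of B's tail table and their columns
lemma build_group_items (objs : List (List (String × List String)))
    (hobj : ∀ obj ∈ objs, (obj.map (·.1)).Nodup) :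
    (build_group objs).items
    = (PySem.List.dedup (objs.flatMap (fun obj => obj.map (·.1)))).map
        (fun key => (key, objs.map (fun obj => rowVal obj key))) := by
  induction objs with
  | nil => rfl
  | cons o t ih =>
      have hto : ∀ obj ∈ t, (obj.map (·.1)).Nodup :=
        fun obj h => hobj obj (List.mem_cons_of_mem _ h)
      have hok : (o.map (·.1)).Nodup := hobj o (by simp)
      have ht := ih hto
      -- abbreviations
      set Kt := PySem.List.dedup (t.flatMap (fun obj => obj.map (·.1))) with hKt
      have hKtnd : Kt.Nodup := PySem.List.nodup_dedup _
      -- tail's keys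
      have htkeys : (build_group t).keys = Kt := by
        simp [PySem.Dict.keys, ht, List.map_map, Function.comp_def]
      -- getD on the tail
      have hget : ∀ k, (build_group t).getD k (List.replicate t.length "")
          = t.map (fun obj => rowVal obj k) := by
        intro k
        by_cases hk : k ∈ Kt
        · exact PySem.Dict.getD_of_mem_items _
            (by rw [ht]; exact List.mem_map_of_mem hk)
            (by rw [htkeys]; exact hKtnd) _
        · rw [PySem.Dict.getD_of_not_contains]
          · refine Eq.symm ?_
            have : ∀ s ∈ t.map (fun obj => rowVal obj k), s = "" := by
              intro s hs
              obtain ⟨obj, hobj', rfl⟩ := List.mem_map.mp hs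
              refine rowVal_of_not_mem obj k (fun hm => hk ?_)
              rw [hKt, PySem.List.mem_dedup]
              exact List.mem_flatMap.mpr ⟨obj, hobj', hm⟩
            calc t.map (fun obj => rowVal obj k)
                = List.replicate (t.map (fun obj => rowVal obj k)).length "" :=
                  List.eq_replicate_of_mem this
              _ = List.replicate t.length "" := by rw [List.length_map]
          · rw [Bool.eq_false_iff]
            intro hc
            exact hk (by rw [← htkeys]; exact (PySem.Dict.contains_iff_mem_keys _ _).mp hc)
      -- the merged head table
      have hmerged : (o.map (fun p =>
            (p.1, [process_attribute_list p.2] ++ (build_group t).getD p.1 (List.replicate t.length ""))))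
          = o.map (fun p => (p.1, rowVal o p.1 :: t.map (fun obj => rowVal obj p.1))) := by
        refine List.map_congr_left (fun p hp => ?_)
        have hg : (PySem.Dict.mk o).get? p.1 = some p.2 :=
          PySem.Dict.get?_of_mem_items (PySem.Dict.mk o) (k := p.1) (v := p.2)
            (by simpa using hp) (by simpa [PySem.Dict.keys] using hok)
        rw [hget p.1]
        simp [rowVal, hg]
      show ((build_group t).items.foldl
          (fun m p => if m.contains p.1 then m else m.insert p.1 ([""] ++ p.2))
          (PySem.Dict.mk (o.map (fun p =>
            (p.1, [process_attribute_list p.2] ++ (build_group t).getD p.1 (List.replicate t.length "")))))).items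
        = _
      rw [hmerged]
      have hmk : (PySem.Dict.mk
          (o.map (fun p => (p.1, rowVal o p.1 :: t.map (fun obj => rowVal obj p.1))))).keys.Nodup := by
        simpa [PySem.Dict.keys, List.map_map] using hok
      rw [skip_insert_fold _ _
        (by rw [ht, List.map_map]; simpa [Function.comp_def] using hKtnd) hmk]
      -- normalize the contains predicate on merged
      have hcont : ∀ k, (PySem.Dict.mk
          (o.map (fun p => (p.1, rowVal o p.1 :: t.map (fun obj => rowVal obj p.1))))).contains k
          = (o.map (·.1)).contains k := by
        intro k
        by_cases h : k ∈ o.map (·.1)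
        · rw [(contains_mk_iff _ k).mpr (by simpa [List.map_map] using h)]
          exact ((List.contains_iff_mem).mpr h).symm
        · have h1 : (PySem.Dict.mk
              (o.map (fun p => (p.1, rowVal o p.1 :: t.map (fun obj => rowVal obj p.1))))).contains k = false := by
            rw [Bool.eq_false_iff]
            intro hc
            exact h (by simpa [List.map_map] using (contains_mk_iff _ k).mp hc)
          have h2 : (o.map (·.1)).contains k = false := by
            rw [Bool.eq_false_iff]
            intro hc
            exact h (List.contains_iff_mem.mp hc)
          rw [h1, h2]
      -- right-hand side key list
      have hK : PySem.List.dedup ((o :: t).flatMap (fun obj => obj.map (·.1)))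
          = o.map (·.1) ++ Kt.filter (fun k => !((o.map (·.1)).contains k)) := by
        rw [PySem.List.dedup_eq_ofList, List.flatMap_cons, PySem.Set.ofList_append,
          PySem.Set.update_eq_append_filter, PySem.Set.ofList_eq_self_of_nodup _ hok,
          hKt, PySem.List.dedup_eq_ofList]
        rfl
      rw [hK, List.map_append]
      congr 1
      · show o.map (fun p => (p.1, rowVal o p.1 :: t.map (fun obj => rowVal obj p.1)))
            = (o.map (·.1)).map (fun key => (key, (o :: t).map (fun obj => rowVal obj key)))
        rw [List.map_map]
        exact List.map_congr_left (fun p hp => by simp)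
      · rw [ht]
        rw [List.filter_map, List.map_map]
        have : ∀ k ∈ Kt.filter (fun k => !((o.map (·.1)).contains k)),
            ((fun p => (p.1, [""] ++ p.2)) ∘ fun key => (key, t.map (fun obj => rowVal obj key))) k
            = (fun key => (key, (o :: t).map (fun obj => rowVal obj key))) k := by
          intro k hk
          have hnm : k ∉ o.map (·.1) := by
            have := (List.mem_filter.mp hk).2
            intro hm
            rw [List.contains_iff_mem.mpr hm] at this
            simp at this
          simp [rowVal_of_not_mem o k hnm]
        rw [List.filter_congr (q := fun k => !((o.map (·.1)).contains k))
          (fun k _ => by simp only [Function.comp_def]; rw [hcont k])]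
        exact List.map_congr_left this

-- whole-program equality
theorem build_eq (oa : List (String × List (List (String × List String))))
    (hnd : (oa.map (·.1)).Nodup)
    (hin : ∀ pr ∈ oa, ∀ obj ∈ pr.2, (obj.map (·.1)).Nodup) :
    build_attributes_arrays oa = build_attributes_arrays_alt oa := by
  unfold build_attributes_arrays build_attributes_arrays_alt
  rw [List.foldl_map]
  rw [PySem.List.foldl_congr_mem oa _
    (fun arrays pr => arrays ++
      [(PySem.List.dedup (pr.2.flatMap (fun obj => obj.map (·.1)))).map
        (fun key => (key, pr.2.map (fun obj => rowVal obj key)))]) []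
    (by
      intro acc pr hpr
      simp only []
      rw [getD_mk_self oa pr hpr hnd]
      rw [group_eq pr.2 (hin pr hpr)])]
  rw [PySem.List.foldl_append_singleton_eq_map]
  refine List.map_congr_left (fun pr hpr => ?_)
  rw [build_group_items pr.2 (hin pr hpr)]

-- ===== VERDICT (by name: the statement is the Claim_ definition above) =====
theorem build_attributes_arrays_spec : Claim_equal_build_attributes_arrays := by
  intro oa _ hpre
  unfold Spec_build_attributes_arrays
  exact build_eq oa hpre.1 hpre.2
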